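-- pv_equiv track=rewrite | github.com/cadebrown/CARVE | tools/genpseudo.py | switchcase_search
-- ===== SOURCE A (Python) =====
-- def switchcase_search(keys: dict):
--     tree = {}
--     for k in keys:
--         cur = tree
--         for c in k:
--             if c not in cur:
--                 cur[c] = dict()
--             cur = cur[c]
--         cur["default"] = keys[k]
--
--     def visit(node, depth, tree):
--         out = ""
--         if node == "default":
--             out += f"{'  ' * (depth + 1)}case '\\0': {{{tree[node]}(); return true;}} break; \\\n"
--         else:
--             depth += 1
--             out += f"{'  ' * depth}case \'{node}\': \\\n"
--             depth += 1
--             out += f"{'  ' * depth}switch (name[counter++]) {{ \\\n"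
--             for k in tree[node]:
--                 out += visit(k, depth, tree[node])
--             out += f"{'  ' * (depth)}}} break; \\\n"
--         return out
--
--     return "switch (name[counter++]) { \\\n" + "".join([visit(k, 1, tree) for k in tree]) + "  }"
-- ===== SOURCE B (Python) =====
-- def switchcase_search(keys: dict):
--     # Recursive first-character partition of (suffix, value) pairs; no trie is built.
--     def emit(pairs, depth):
--         if not pairs:
--             return ""
--         k0 = pairs[0][0][:1]
--         rest = [(s, v) for s, v in pairs if s[:1] != k0]
--         if k0 == "":
--             bucket = [(s, v) for s, v in pairs if s[:1] == k0]
--             return (f"{'  ' * (depth + 1)}case '\\0': {{{bucket[-1][1]}(); return true;}} break; \\\n"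
--                     + emit(rest, depth))
--         bucket = [(s[1:], v) for s, v in pairs if s[:1] == k0]
--         return (f"{'  ' * (depth + 1)}case '{k0}': \\\n"
--                 f"{'  ' * (depth + 2)}switch (name[counter++]) {{ \\\n"
--                 + emit(bucket, depth + 2)
--                 + f"{'  ' * (depth + 2)}}} break; \\\n"
--                 + emit(rest, depth))
--     return "switch (name[counter++]) { \\\n" + emit(list(keys.items()), 1) + "  }"
-- ===== Notes on version B (the rewrite author's own statement) =====
-- stated objective: alternative
-- what changed: B never builds A's nested trie-of-dicts: a single recursion partitions the (suffix, value) pairs by first character (empty suffixes forming the '\0' bucket) and emits each switch block directly, preserving first-encounter order.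
import Mathlib
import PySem

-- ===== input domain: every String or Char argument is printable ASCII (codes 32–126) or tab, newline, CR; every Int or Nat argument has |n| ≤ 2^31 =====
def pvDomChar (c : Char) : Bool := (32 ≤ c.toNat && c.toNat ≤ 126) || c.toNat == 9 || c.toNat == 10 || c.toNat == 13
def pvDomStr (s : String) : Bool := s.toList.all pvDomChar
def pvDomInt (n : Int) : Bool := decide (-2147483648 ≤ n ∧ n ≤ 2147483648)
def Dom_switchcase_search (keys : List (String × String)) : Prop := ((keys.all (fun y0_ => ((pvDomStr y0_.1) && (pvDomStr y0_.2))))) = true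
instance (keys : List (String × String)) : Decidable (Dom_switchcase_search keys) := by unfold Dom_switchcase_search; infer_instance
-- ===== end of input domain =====

-- B replaces A's build-a-trie-then-visit with a single recursion that partitions (suffix, value)
-- pairs by first character; same output, no trie (objective: alternative decomposition).
-- The input is a Python dict, passed here as its item list in insertion order.

-- ===== PORT A =====

-- Python's nested trie dict: keys are chars (`some c`) or the string "default" (`none`);
-- a mutual pair instead of a nested inductive, `TrieL` is the dict as an ordered entry list.
mutual
inductive Trie where
  | leaf : String → Trie       -- tree["default"] = <value string>
  | node : TrieL → Trie        -- tree[c] = <sub-dict>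
inductive TrieL where
  | nil : TrieL
  | cons : Option Char → Trie → TrieL → TrieL
end

-- dict assignment cur[k] = x : overwrite in place, else append (Python dict semantics)
def TrieL.set : TrieL → Option Char → Trie → TrieL
  | .nil, k, x => .cons k x .nil
  | .cons k' t' tl, k, x => if k' = k then .cons k' x tl else .cons k' t' (TrieL.set tl k x)

def TrieL.get? : TrieL → Option Char → Option Trie
  | .nil, _ => none
  | .cons k' t' tl, k => if k' = k then some t' else TrieL.get? tl k

def childT : Option Trie → TrieL
  | some (.node tl) => tl
  | _ => .nil

-- the inner `for c in k` loop: `if c not in cur: cur[c] = dict()` then descend; since the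
-- freshly inserted dict is mutated in place, the net effect is setting the final subtree.
def insertT : List Char → String → TrieL → TrieL
  | [], v, t => t.set none (.leaf v)
  | c :: rest, v, t => t.set (some c) (.node (insertT rest v (childT (t.get? (some c)))))

-- `for k in keys: ... cur["default"] = keys[k]` — iterating a dict's items gives (k, keys[k])
def buildT (keys : List (String × String)) : TrieL :=
  keys.foldl (fun t p => insertT p.1.toList p.2 t) .nil

def indent (d : Nat) : String := String.ofList (List.replicate (2 * d) ' ')   -- '  ' * d

mutual
-- visit(node, depth, tree) receives the key and tree[key] (the only use it makes of tree);
-- the (none, node _) and (some _, leaf _) shapes never occur in a built trie.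
def visitE : Option Char → Nat → Trie → String
  | none, d, .leaf v =>
      indent (d + 1) ++ "case '\\0': {" ++ v ++ "(); return true;} break; \\\n"
  | none, _, .node _ => ""
  | some c, d, .node tl =>
      (indent (d + 1) ++ "case '" ++ String.ofList [c] ++ "': \\\n"
        ++ indent (d + 2) ++ "switch (name[counter++]) { \\\n")
        ++ visitL (d + 2) tl
        ++ (indent (d + 2) ++ "} break; \\\n")
  | some c, d, .leaf _ =>      -- unreachable shape: chars always map to sub-dicts
      (indent (d + 1) ++ "case '" ++ String.ofList [c] ++ "': \\\n"
        ++ indent (d + 2) ++ "switch (name[counter++]) { \\\n")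
        ++ ""
        ++ (indent (d + 2) ++ "} break; \\\n")
def visitL : Nat → TrieL → String
  | _, .nil => ""
  | d, .cons k sub tl => visitE k d sub ++ visitL d tl
end

def switchcase_search (keys : List (String × String)) : String :=
  "switch (name[counter++]) { \\\n" ++ visitL 1 (buildT keys) ++ "  }"

-- ===== PORT B =====

-- Python strings handled as char lists; s[:1] is s.head?, s[1:] is s.tail.
def muB (ps : List (List Char × String)) : Nat := (ps.map (fun p => p.1.length + 1)).sum

theorem muB_filter_le (q : List Char × String → Bool) (ps : List (List Char × String)) :
    muB (ps.filter q) ≤ muB ps := by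
  induction ps with
  | nil => simp [muB]
  | cons p ps ih =>
      by_cases h : q p = true <;> simp [muB, h] at * <;> omega

theorem muB_map_tail_le (qs : List (List Char × String)) :
    muB (qs.map (fun p => (p.1.tail, p.2))) ≤ muB qs := by
  induction qs with
  | nil => simp [muB]
  | cons q qs ih =>
      have : q.1.tail.length ≤ q.1.length := by simp [List.length_tail]
      simp [muB] at *; omega

theorem muB_filter_cons_lt (f : List Char × String → Bool) (s : List Char) (v : String)
    (ps : List (List Char × String)) (h : f (s, v) = false) :
    muB (((s, v) :: ps).filter f) < muB ((s, v) :: ps) := by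
  have := muB_filter_le f ps
  simp [h, muB] at *; omega

theorem muB_bucket_lt (c : Char) (r : List Char) (v : String) (ps : List (List Char × String)) :
    muB ((((c :: r, v) :: ps).filter (fun p => p.1.head? == some c)).map (fun p => (p.1.tail, p.2)))
      < muB ((c :: r, v) :: ps) := by
  have h1 := muB_filter_le (fun p => p.1.head? == some c) ps
  have h2 := muB_map_tail_le (ps.filter (fun p => p.1.head? == some c))
  simp [muB] at *; omega

def emitB : List (List Char × String) → Nat → String
  | [], _ => ""
  | ([], v) :: ps, d =>
      (indent (d + 1) ++ "case '\\0': {"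
        ++ (match ((([], v) :: ps).filter (fun p => p.1.head? == (none : Option Char))).getLast? with
            | some q => q.2 | none => "")
        ++ "(); return true;} break; \\\n")
      ++ emitB ((([], v) :: ps).filter (fun p => !(p.1.head? == (none : Option Char)))) d
  | (c :: r, v) :: ps, d =>
      (indent (d + 1) ++ "case '" ++ String.ofList [c] ++ "': \\\n"
        ++ indent (d + 2) ++ "switch (name[counter++]) { \\\n")
      ++ emitB ((((c :: r, v) :: ps).filter (fun p => p.1.head? == some c)).map (fun p => (p.1.tail, p.2))) (d + 2)
      ++ (indent (d + 2) ++ "} break; \\\n")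
      ++ emitB (((c :: r, v) :: ps).filter (fun p => !(p.1.head? == some c))) d
  termination_by ps _ => muB ps
  decreasing_by
    · exact muB_filter_cons_lt _ _ _ _ (by simp)
    · exact muB_bucket_lt c r v ps
    · exact muB_filter_cons_lt _ _ _ _ (by simp)

def switchcase_search_alt (keys : List (String × String)) : String :=
  "switch (name[counter++]) { \\\n"
    ++ emitB (keys.map (fun p => (p.1.toList, p.2))) 1 ++ "  }"

-- ===== PRECONDITION & SPEC =====
def Spec_switchcase_search (keys : List (String × String)) (out : String) : Prop := out = switchcase_search_alt keys
instance (keys : List (String × String)) (out : String) : Decidable (Spec_switchcase_search keys out) := by unfold Spec_switchcase_search; infer_instance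

-- ===== CLAIM (what is proved, stated in full; the proofs are below) =====
def Claim_equal_switchcase_search : Prop := ∀ (keys : List (String × String)), Dom_switchcase_search keys → Spec_switchcase_search keys (switchcase_search keys)

-- ===== LEMMAS AND PROOFS =====

def stepP (t : TrieL) (p : List Char × String) : TrieL := insertT p.1 p.2 t

def buildP (ps : List (List Char × String)) : TrieL := ps.foldl stepP .nil

theorem buildP_def (ps : List (List Char × String)) :
    List.foldl stepP TrieL.nil ps = buildP ps := rfl

def childT' : Trie → TrieL
  | .node tl => tl
  | .leaf _ => .nil

def updP (x : Trie) (p : List Char × String) : Trie :=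
  match p.1 with
  | [] => .leaf p.2
  | _ :: r => .node (insertT r p.2 (childT' x))

theorem step_cons (p : List Char × String) (k : Option Char) (x : Trie) (tl : TrieL) :
    stepP (.cons k x tl) p =
      if p.1.head? = k then .cons k (updP x p) tl else .cons k x (stepP tl p) := by
  obtain ⟨s, v⟩ := p
  cases s with
  | nil =>
      by_cases h : (none : Option Char) = k
      · subst h; simp [stepP, insertT, TrieL.set, updP]
      · simp [stepP, insertT, TrieL.set, h]
        intro h'; exact absurd h'.symm h
  | cons c r =>
      by_cases h : (some c : Option Char) = k
      · subst h; simp [stepP, insertT, TrieL.set, TrieL.get?, updP]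
        cases x <;> simp [childT, childT']
      · have h' : ¬ (k = some c) := fun h' => h h'.symm
        simp [stepP, insertT, TrieL.set, TrieL.get?, h, h']

theorem foldl_split (ps : List (List Char × String)) (k : Option Char) (x : Trie) (tl : TrieL) :
    List.foldl stepP (.cons k x tl) ps
      = .cons k (List.foldl updP x (ps.filter (fun p => p.1.head? == k)))
          (List.foldl stepP tl (ps.filter (fun p => !(p.1.head? == k)))) := by
  induction ps generalizing x tl with
  | nil => simp
  | cons p ps ih =>
      by_cases h : p.1.head? = k
      · simp [h, step_cons, ih]
      · simp [h, step_cons, ih]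

theorem buildP_cons (s : List Char) (v : String) (ps : List (List Char × String)) :
    buildP ((s, v) :: ps)
      = .cons s.head?
          (List.foldl updP (.node .nil) (((s, v) :: ps).filter (fun p => p.1.head? == s.head?)))
          (buildP (((s, v) :: ps).filter (fun p => !(p.1.head? == s.head?)))) := by
  have h0 : stepP TrieL.nil (s, v) = .cons s.head? (updP (.node .nil) (s, v)) .nil := by
    cases s <;> simp [stepP, insertT, TrieL.set, TrieL.get?, childT, childT', updP]
  unfold buildP
  rw [List.foldl_cons, h0, foldl_split]
  simp

theorem fold_upd_leaf (qs : List (List Char × String)) (x : Trie)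
    (h : ∀ p ∈ qs, p.1 = ([] : List Char)) (hne : qs ≠ []) :
    List.foldl updP x qs = .leaf (match qs.getLast? with | some q => q.2 | none => "") := by
  induction qs generalizing x with
  | nil => exact absurd rfl hne
  | cons q qs ih =>
      cases qs with
      | nil =>
          have hq := h q (by simp)
          simp [updP, hq]
      | cons q2 qs2 =>
          rw [List.foldl_cons, ih _ (fun p hp => h p (by simp [hp])) (by simp),
            List.getLast?_cons_cons]

theorem fold_upd_node (qs : List (List Char × String)) (t : TrieL)
    (h : ∀ p ∈ qs, p.1 ≠ ([] : List Char)) :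
    List.foldl updP (.node t) qs
      = .node (List.foldl stepP t (qs.map (fun p => (p.1.tail, p.2)))) := by
  induction qs generalizing t with
  | nil => simp
  | cons q qs ih =>
      obtain ⟨s, v⟩ := q
      cases s with
      | nil => exact absurd rfl (h ([], v) (by simp))
      | cons c r =>
          rw [List.foldl_cons, List.map_cons, List.foldl_cons]
          have : updP (.node t) (c :: r, v) = .node (stepP t ((c :: r, v).1.tail, v)) := by
            simp [updP, childT', stepP]
          rw [this, ih _ (fun p hp => h p (by simp [hp]))]

theorem visit_emit (n : Nat) : ∀ ps d, muB ps ≤ n → visitL d (buildP ps) = emitB ps d := by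
  induction n with
  | zero =>
      intro ps d h
      cases ps with
      | nil => simp [buildP, visitL, emitB]
      | cons p ps => exfalso; simp [muB] at h
  | succ n ih =>
      intro ps d h
      cases ps with
      | nil => simp [buildP, visitL, emitB]
      | cons p ps =>
          obtain ⟨s, v⟩ := p
          cases s with
          | nil =>
              rw [buildP_cons]
              simp only [List.head?_nil]
              have hb : ∀ p ∈ (([], v) :: ps).filter (fun p => p.1.head? == (none : Option Char)),
                  p.1 = ([] : List Char) := by
                intro p hp
                have hq := (List.mem_filter.mp hp).2
                simpa [List.head?_eq_none_iff] using hq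
              have hr : muB ((([], v) :: ps).filter (fun p => !(p.1.head? == (none : Option Char)))) ≤ n := by
                have := muB_filter_cons_lt (fun p => !(p.1.head? == (none : Option Char))) [] v ps (by simp)
                omega
              rw [fold_upd_leaf _ _ hb (by simp)]
              simp only [visitL, visitE]
              rw [ih _ d hr, emitB]
          | cons c r =>
              rw [buildP_cons]
              simp only [List.head?_cons]
              have hb : ∀ p ∈ ((c :: r, v) :: ps).filter (fun p => p.1.head? == some c),
                  p.1 ≠ ([] : List Char) := by
                intro p hp hnil
                have hq := (List.mem_filter.mp hp).2
                rw [hnil] at hq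
                simp at hq
              have hbu : muB ((((c :: r, v) :: ps).filter (fun p => p.1.head? == some c)).map
                  (fun p => (p.1.tail, p.2))) ≤ n := by
                have := muB_bucket_lt c r v ps
                omega
              have hr : muB (((c :: r, v) :: ps).filter (fun p => !(p.1.head? == some c))) ≤ n := by
                have := muB_filter_cons_lt (fun p => !(p.1.head? == some c)) (c :: r) v ps (by simp)
                omega
              rw [fold_upd_node _ _ hb]
              simp only [visitL, visitE, buildP_def]
              rw [ih _ (d + 2) hbu, ih _ d hr, emitB]

-- ===== VERDICT (by name: the statement is the Claim_ definition above) =====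
theorem switchcase_search_spec : Claim_equal_switchcase_search := by
  intro keys _
  unfold Spec_switchcase_search switchcase_search switchcase_search_alt
  have hb : buildT keys = buildP (keys.map (fun p => (p.1.toList, p.2))) := by
    simp [buildT, buildP, List.foldl_map, stepP]
  rw [hb, visit_emit (muB (keys.map (fun p => (p.1.toList, p.2)))) _ 1 (le_refl _)]
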